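-- pv_equiv track=rewrite | github.com/yuseang0131/Pac-Man | main.py | load_collision_data
-- ===== SOURCE A (Python) =====
-- def load_collision_data(data, size):
--     data = data["map"]["map"]
--
--     collision_data = [[0] * (size[0] + 1) for _ in range(size[1] + 1)]
--
--     for i in range(size[1]):
--         for j in range(size[0]):
--             if data[i][j] == 2:
--                 collision_data[i][j] = 2
--                 collision_data[i+1][j] = 2
--                 collision_data[i][j+1] = 2
--                 collision_data[i+1][j+1] = 2
--             elif data[i][j] == 1:
--                 collision_data[i][j] = 1
--                 collision_data[i+1][j] = 1
--                 collision_data[i][j+1] = 1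
--                 collision_data[i+1][j+1] = 1
--
--
--     return collision_data
-- ===== SOURCE B (Python) =====
-- def load_collision_data(data, size):
--     grid = data["map"]["map"]
--     W, H = size[0], size[1]
--
--     def cell_value(r, c):
--         # the input cells that could have written corner (r, c), in
--         # decreasing write-time order (row-major last write wins)
--         for i, j in ((r, c), (r, c - 1), (r - 1, c), (r - 1, c - 1)):
--             if 0 <= i < H and 0 <= j < W and grid[i][j] in (1, 2):
--                 return grid[i][j]
--         return 0
--
--     return [[cell_value(r, c) for c in range(W + 1)] for r in range(H + 1)]
-- ===== Notes on version B (the rewrite author's own statement) =====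
-- stated objective: alternative
-- what changed: Replaces A's scatter (each marked map cell writes its four corners into a mutable grid, row-major last write wins) by a gather that computes every output corner directly from its up-to-four possible writer cells in decreasing write-time priority.
import Mathlib
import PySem

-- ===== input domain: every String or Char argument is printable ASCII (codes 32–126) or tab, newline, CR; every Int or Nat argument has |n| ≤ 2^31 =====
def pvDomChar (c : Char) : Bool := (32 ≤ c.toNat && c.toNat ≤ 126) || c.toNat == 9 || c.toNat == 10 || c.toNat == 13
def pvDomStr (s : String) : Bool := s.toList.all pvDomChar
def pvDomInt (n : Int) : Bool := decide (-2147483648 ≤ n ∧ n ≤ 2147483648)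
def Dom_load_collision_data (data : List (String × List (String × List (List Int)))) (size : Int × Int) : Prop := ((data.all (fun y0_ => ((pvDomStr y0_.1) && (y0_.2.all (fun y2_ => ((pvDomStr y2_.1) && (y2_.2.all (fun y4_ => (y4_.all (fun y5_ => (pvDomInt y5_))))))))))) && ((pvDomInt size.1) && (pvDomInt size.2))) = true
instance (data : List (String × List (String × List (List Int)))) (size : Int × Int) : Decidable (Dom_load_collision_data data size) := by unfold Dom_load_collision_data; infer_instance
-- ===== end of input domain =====

-- B replaces A's scatter (each marked input cell writes its four corners, row-major last write
-- wins) by a direct gather computing each output corner from its up-to-four possible writers;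
-- objective: alternative decomposition, same asymptotic cost.

-- ===== PORT A =====

-- data[i][j] (both indexes in range under Pre_, where pyGetD is exact)
def pvReadA (g : List (List Int)) (i j : Int) : Int :=
  PySem.List.pyGetD (PySem.List.pyGetD g i []) j 0

-- collision_data[i][j] = v  (indices produced by A's loops are always in range, where pySetD is exact)
def pvSetA (g : List (List Int)) (i j v : Int) : List (List Int) :=
  PySem.List.pySetD g i (PySem.List.pySetD (PySem.List.pyGetD g i []) j v)

-- the four assignments of one branch of A's if/elif
def pvMarkA (g : List (List Int)) (i j v : Int) : List (List Int) :=
  pvSetA (pvSetA (pvSetA (pvSetA g i j v) (i+1) j v) i (j+1) v) (i+1) (j+1) v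

def load_collision_data (data : List (String × List (String × List (List Int)))) (size : Int × Int) : List (List Int) :=
  let grid := (((data.lookup "map").getD []).lookup "map").getD []   -- data["map"]["map"]; keys present under Pre_
  let base := List.replicate (size.2 + 1).toNat (List.replicate (size.1 + 1).toNat (0 : Int))
  (PySem.List.pyRange 0 size.2 1).foldl (fun g i =>
    (PySem.List.pyRange 0 size.1 1).foldl (fun g j =>
      if pvReadA grid i j = 2 then pvMarkA g i j 2
      else if pvReadA grid i j = 1 then pvMarkA g i j 1
      else g) g) base

-- ===== PORT B =====

-- grid[i][j] (in range whenever pvPickB reads it, under Pre_)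
def pvReadB (g : List (List Int)) (i j : Int) : Int :=
  PySem.List.pyGetD (PySem.List.pyGetD g i []) j 0

-- B's cell_value loop: first candidate writer that is in bounds and marked 1 or 2
def pvPickB (g : List (List Int)) (W H : Int) : List (Int × Int) → Int
  | [] => 0
  | (i, j) :: rest =>
      if 0 ≤ i ∧ i < H ∧ 0 ≤ j ∧ j < W ∧ (pvReadB g i j = 1 ∨ pvReadB g i j = 2)
      then pvReadB g i j
      else pvPickB g W H rest

def load_collision_data_alt (data : List (String × List (String × List (List Int)))) (size : Int × Int) : List (List Int) :=
  let grid := (((data.lookup "map").getD []).lookup "map").getD []   -- data["map"]["map"]; keys present under Pre_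
  (PySem.List.pyRange 0 (size.2 + 1) 1).map (fun r =>
    (PySem.List.pyRange 0 (size.1 + 1) 1).map (fun c =>
      pvPickB grid size.1 size.2 [(r, c), (r, c - 1), (r - 1, c), (r - 1, c - 1)]))

-- ===== PRECONDITION & SPEC =====
-- Pre_ excludes exactly the inputs on which the Python A raises: a missing "map" key (KeyError),
-- or, when both sizes are positive, a map grid with fewer than size[1] rows or a scanned row
-- shorter than size[0] (IndexError).
def Pre_load_collision_data (data : List (String × List (String × List (List Int)))) (size : Int × Int) : Prop :=
  (data.lookup "map").isSome ∧
  (((data.lookup "map").getD []).lookup "map").isSome ∧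
  (0 < size.1 ∧ 0 < size.2 →
    size.2 ≤ (((((data.lookup "map").getD []).lookup "map").getD []).length : Int) ∧
    ∀ row ∈ ((((data.lookup "map").getD []).lookup "map").getD []).take size.2.toNat,
      size.1 ≤ (row.length : Int))
instance (data : List (String × List (String × List (List Int)))) (size : Int × Int) : Decidable (Pre_load_collision_data data size) := by unfold Pre_load_collision_data; infer_instance

def pvWitness_load_collision_data : (List (String × List (String × List (List Int)))) × (Int × Int) :=
  ([("map", [("map", [[1, 0], [0, 2]])])], (2, 2))

def Spec_load_collision_data (data : List (String × List (String × List (List Int)))) (size : Int × Int) (out : List (List Int)) : Prop := out = load_collision_data_alt data size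
instance (data : List (String × List (String × List (List Int)))) (size : Int × Int) (out : List (List Int)) : Decidable (Spec_load_collision_data data size out) := by unfold Spec_load_collision_data; infer_instance

-- ===== CLAIM (what is proved, stated in full; the proofs are below) =====
def Claim_equal_load_collision_data : Prop := ∀ (data : List (String × List (String × List (List Int)))) (size : Int × Int), Dom_load_collision_data data size → Pre_load_collision_data data size → Spec_load_collision_data data size (load_collision_data data size)

-- ===== LEMMAS AND PROOFS =====

-- The value A writes for input cell (i,j): 0 means "no write".
def pvVal (g : List (List Int)) (i j : Int) : Int :=
  if pvReadA g i j = 2 then 2 else if pvReadA g i j = 1 then 1 else 0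

-- functional grid model of A's mutable 2-D list
def pvUpd (F : Int → Int → Int) (i j v : Int) : Int → Int → Int :=
  fun a b => if a = i ∧ b = j then v else F a b

def pvW4 (F : Int → Int → Int) (i j v : Int) : Int → Int → Int :=
  pvUpd (pvUpd (pvUpd (pvUpd F i j v) (i+1) j v) i (j+1) v) (i+1) (j+1) v

def pvStep (g : List (List Int)) (F : Int → Int → Int) (i j : Int) : Int → Int → Int :=
  if pvReadA g i j = 2 then pvW4 F i j 2
  else if pvReadA g i j = 1 then pvW4 F i j 1
  else F

def pvInB (W H i j : Int) : Bool := decide (0 ≤ i ∧ i < H ∧ 0 ≤ j ∧ j < W)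

-- gather relative to a set p of already-processed input cells
def pvSel (g : List (List Int)) (W H : Int) (p : Int → Int → Bool) : List (Int × Int) → Int
  | [] => 0
  | (i, j) :: rest =>
      if pvInB W H i j = true ∧ p i j = true ∧ pvVal g i j ≠ 0 then pvVal g i j
      else pvSel g W H p rest

def pvG (g : List (List Int)) (W H : Int) (p : Int → Int → Bool) (r c : Int) : Int :=
  pvSel g W H p [(r, c), (r, c - 1), (r - 1, c), (r - 1, c - 1)]

-- strict row-major (lex) order on write positions
def pvLex (a b : Int × Int) : Prop := a.1 < b.1 ∨ (a.1 = b.1 ∧ a.2 < b.2)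

-- the row-major sequence of input cells A scans
def pvWs (W H : Int) : List (Int × Int) :=
  (PySem.List.pyRange 0 H 1).flatMap (fun i => (PySem.List.pyRange 0 W 1).map (fun j => (i, j)))

def pvTable (W H : Int) (F : Int → Int → Int) : List (List Int) :=
  (List.range (H + 1).toNat).map (fun r : Nat =>
    (List.range (W + 1).toNat).map (fun c : Nat => F (r : Int) (c : Int)))

lemma pvStep_val (g : List (List Int)) (F : Int → Int → Int) (i j : Int) :
    pvStep g F i j = if pvVal g i j ≠ 0 then pvW4 F i j (pvVal g i j) else F := by
  unfold pvStep pvVal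
  split_ifs <;> simp_all

lemma pvSel_congr (g : List (List Int)) (W H : Int) (p q : Int → Int → Bool) :
    ∀ l : List (Int × Int),
      (∀ x ∈ l, pvInB W H x.1 x.2 = true → pvVal g x.1 x.2 ≠ 0 → p x.1 x.2 = q x.1 x.2) →
      pvSel g W H p l = pvSel g W H q l := by
  intro l
  induction l with
  | nil => intro _; rfl
  | cons x rest ih =>
      intro h
      obtain ⟨i, j⟩ := x
      by_cases hb : pvInB W H i j = true
      · by_cases hv : pvVal g i j = 0
        · simp only [pvSel]
          rw [if_neg (fun hc => hc.2.2 hv), if_neg (fun hc => hc.2.2 hv)]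
          exact ih (fun y hy => h y (List.mem_cons_of_mem _ hy))
        · have hpq := h (i, j) List.mem_cons_self hb hv
          simp only [pvSel, hpq]
          rw [ih (fun y hy => h y (List.mem_cons_of_mem _ hy))]
      · simp only [pvSel]
        rw [if_neg (fun hc => hb hc.1), if_neg (fun hc => hb hc.1)]
        exact ih (fun y hy => h y (List.mem_cons_of_mem _ hy))

lemma pvSel_false (g : List (List Int)) (W H : Int) :
    ∀ l, pvSel g W H (fun _ _ => false) l = 0 := by
  intro l
  induction l with
  | nil => rfl
  | cons x rest ih => obtain ⟨i, j⟩ := x; simp [pvSel, ih]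

lemma pvPickB_eq_sel (g : List (List Int)) (W H : Int) :
    ∀ l, pvPickB g W H l = pvSel g W H (fun _ _ => true) l := by
  intro l
  induction l with
  | nil => rfl
  | cons x rest ih =>
      obtain ⟨i, j⟩ := x
      by_cases h2 : pvReadB g i j = 2 <;> by_cases h1 : pvReadB g i j = 1 <;>
        by_cases hb : 0 ≤ i ∧ i < H ∧ 0 ≤ j ∧ j < W <;>
        simp_all [pvPickB, pvSel, pvInB, pvVal, pvReadB, pvReadA]

-- the key step: processing write (k,m) extends the processed set by (k,m)
lemma pvStep_G (g : List (List Int)) (W H : Int) (p : Int → Int → Bool) (k m : Int)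
    (hin : pvInB W H k m = true)
    (hmono : ∀ i j, p i j = true → pvLex (i, j) (k, m)) :
    pvStep g (pvG g W H p) k m
      = pvG g W H (fun i j => p i j || (decide (i = k) && decide (j = m))) := by
  have hnp : ∀ i j : Int, ¬ pvLex (i, j) (k, m) → ¬(i = k ∧ j = m) →
      (p i j || (decide (i = k) && decide (j = m))) = false := by
    intro i j hnl hne
    cases hpij : p i j with
    | true => exact absurd (hmono i j hpij) hnl
    | false => simp; tauto
  have skip : ∀ i j : Int, ¬ pvLex (i, j) (k, m) → ¬(i = k ∧ j = m) →
      ¬ (pvInB W H i j = true ∧ (p i j || (decide (i = k) && decide (j = m))) = true ∧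
          pvVal g i j ≠ 0) := by
    intro i j h1 h2 h
    rw [hnp i j h1 h2] at h
    exact Bool.false_ne_true h.2.1
  have pe : ∀ i j : Int, ¬(i = k ∧ j = m) →
      (p i j || (decide (i = k) && decide (j = m))) = p i j := by
    intro i j hne
    have : (decide (i = k) && decide (j = m)) = false := by simp; tauto
    rw [this, Bool.or_false]
  rw [pvStep_val]
  by_cases hv : pvVal g k m = 0
  · rw [if_neg (by simp [hv])]
    funext r c
    refine pvSel_congr g W H _ _ _ (fun x _ _ hvx => ?_)
    refine (pe x.1 x.2 (fun he => ?_)).symm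
    exact hvx (by rw [he.1, he.2]; exact hv)
  · rw [if_pos hv]
    funext r c
    have hit : ∀ i j : Int, i = k → j = m →
        (pvInB W H i j = true ∧ (p i j || (decide (i = k) && decide (j = m))) = true ∧
          pvVal g i j ≠ 0) := by
      rintro i j rfl rfl
      exact ⟨hin, by simp, hv⟩
    simp only [pvW4, pvUpd, pvG, pvSel]
    -- LHS if-order: (k+1,m+1), (k,m+1), (k+1,m), (k,m)
    by_cases c4 : r = k + 1 ∧ c = m + 1
    · rw [if_pos c4,
        if_neg (skip r c (by simp [pvLex]; omega) (by omega)),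
        if_neg (skip r (c-1) (by simp [pvLex]; omega) (by omega)),
        if_neg (skip (r-1) c (by simp [pvLex]; omega) (by omega)),
        if_pos (hit (r-1) (c-1) (by omega) (by omega)),
        show r - 1 = k by omega, show c - 1 = m by omega]
    · by_cases c2 : r = k ∧ c = m + 1
      · rw [if_neg (by omega), if_pos c2,
          if_neg (skip r c (by simp [pvLex]; omega) (by omega)),
          if_pos (hit r (c-1) (by omega) (by omega)),
          show c - 1 = m by omega, c2.1]
      · by_cases c3 : r = k + 1 ∧ c = m
        · rw [if_neg (by omega), if_neg (by omega), if_pos c3,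
            if_neg (skip r c (by simp [pvLex]; omega) (by omega)),
            if_neg (skip r (c-1) (by simp [pvLex]; omega) (by omega)),
            if_pos (hit (r-1) c (by omega) (by omega)),
            show r - 1 = k by omega, c3.2]
        · by_cases c1 : r = k ∧ c = m
          · rw [if_neg (by omega), if_neg (by omega), if_neg (by omega), if_pos c1,
              if_pos (hit r c (by omega) (by omega)), c1.1, c1.2]
          · rw [if_neg (by omega), if_neg (by omega), if_neg (by omega), if_neg (by omega),
              pe r c (by omega), pe r (c-1) (by omega), pe (r-1) c (by omega),
              pe (r-1) (c-1) (by omega)]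

lemma pvFold_sel (g : List (List Int)) (W H : Int) :
    ∀ (l : List (Int × Int)) (p : Int → Int → Bool),
      l.Pairwise pvLex →
      (∀ x ∈ l, pvInB W H x.1 x.2 = true) →
      (∀ i j, p i j = true → ∀ x ∈ l, pvLex (i, j) x) →
      l.foldl (fun F x => pvStep g F x.1 x.2) (pvG g W H p)
        = pvG g W H (fun i j => p i j || l.contains (i, j)) := by
  intro l
  induction l with
  | nil =>
      intro p _ _ _
      funext r c
      exact pvSel_congr g W H _ _ _ (fun x _ _ _ => by simp)
  | cons x rest ih =>
      intro p h1 h2 h3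
      obtain ⟨k, m⟩ := x
      have hpair := List.pairwise_cons.mp h1
      rw [List.foldl_cons,
        pvStep_G g W H p k m (h2 (k, m) List.mem_cons_self)
          (fun i j hp => h3 i j hp (k, m) List.mem_cons_self),
        ih _ hpair.2 (fun y hy => h2 y (List.mem_cons_of_mem _ hy))
          (fun i j hp y hy => by
            rcases (Bool.or_eq_true _ _).mp hp with h | h
            · exact h3 i j h y (List.mem_cons_of_mem _ hy)
            · have hik : i = k := by simpa using (Bool.and_eq_true_iff.mp h).1
              have hjm : j = m := by simpa using (Bool.and_eq_true_iff.mp h).2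
              rw [hik, hjm]; exact hpair.1 y hy)]
      funext r c
      refine pvSel_congr g W H _ _ _ (fun x _ _ _ => ?_)
      obtain ⟨i, j⟩ := x
      by_cases hik : i = k <;> by_cases hjm : j = m <;>
        simp [hik, hjm, Bool.or_comm]

lemma pvFoldl_nested (g : List (List Int)) (I J : List Int) :
    ∀ F : Int → Int → Int,
      I.foldl (fun F i => J.foldl (fun F j => pvStep g F i j) F) F
        = (I.flatMap (fun i => J.map (fun j => (i, j)))).foldl
            (fun F x => pvStep g F x.1 x.2) F := by
  induction I with
  | nil => intro F; rfl
  | cons i I ih =>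
      intro F
      rw [List.foldl_cons, List.flatMap_cons, List.foldl_append, List.foldl_map, ih]

lemma pvPairwise_ws (W H : Int) : (pvWs W H).Pairwise pvLex := by
  unfold pvWs
  rw [List.pairwise_flatMap]
  constructor
  · intro a _
    rw [List.pairwise_map]
    exact (PySem.List.pairwise_lt_pyRange_one 0 W).imp (fun h => Or.inr ⟨rfl, h⟩)
  · refine (PySem.List.pairwise_lt_pyRange_one 0 H).imp (fun {a b} hab x hx y hy => ?_)
    simp only [List.mem_map] at hx hy
    obtain ⟨jx, _, rfl⟩ := hx
    obtain ⟨jy, _, rfl⟩ := hy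
    exact Or.inl hab

lemma pvInB_mem_ws (W H i j : Int) : pvInB W H i j = true ↔ (i, j) ∈ pvWs W H := by
  simp only [pvWs, pvInB, List.mem_flatMap, List.mem_map, PySem.List.mem_pyRange_one,
    decide_eq_true_eq, Prod.mk.injEq]
  constructor
  · rintro ⟨h1, h2, h3, h4⟩
    exact ⟨i, ⟨h1, h2⟩, j, ⟨h3, h4⟩, rfl, rfl⟩
  · rintro ⟨a, ha, b, hb, rfl, rfl⟩
    exact ⟨ha.1, ha.2, hb.1, hb.2⟩

-- A's nested loop, on the functional grid, computes exactly B's gather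
lemma pvA_fun (g : List (List Int)) (W H : Int) :
    (PySem.List.pyRange 0 H 1).foldl
        (fun F i => (PySem.List.pyRange 0 W 1).foldl (fun F j => pvStep g F i j) F)
        (fun _ _ => (0 : Int))
      = fun r c => pvPickB g W H [(r, c), (r, c - 1), (r - 1, c), (r - 1, c - 1)] := by
  have h0 : (fun _ _ => (0 : Int)) = pvG g W H (fun _ _ => false) := by
    funext r c
    exact (pvSel_false g W H _).symm
  rw [pvFoldl_nested, h0]
  have hws : (PySem.List.pyRange 0 H 1).flatMap
      (fun i => (PySem.List.pyRange 0 W 1).map (fun j => (i, j))) = pvWs W H := rfl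
  rw [hws, pvFold_sel g W H (pvWs W H) _ (pvPairwise_ws W H)
      (fun x hx => (pvInB_mem_ws W H x.1 x.2).mpr (by simpa using hx))
      (fun i j hp => by simp at hp)]
  funext r c
  rw [pvG, pvPickB_eq_sel]
  refine pvSel_congr g W H _ _ _ (fun x _ hbx _ => ?_)
  simp only [Bool.false_or]
  have : (x.1, x.2) ∈ pvWs W H := (pvInB_mem_ws W H x.1 x.2).mp hbx
  simpa using this

lemma pvTable_get (W H : Int) (F : Int → Int → Int) (i : Int) (hi : 0 ≤ i) (hiH : i ≤ H) :
    PySem.List.pyGetD (pvTable W H F) i []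
      = (List.range (W + 1).toNat).map (fun c : Nat => F i (c : Int)) := by
  rw [PySem.List.pyGetD_eq_getElem (pvTable W H F) [] hi (by simp [pvTable]; omega)]
  unfold pvTable
  rw [List.getElem_map, List.getElem_range]
  rw [Int.toNat_of_nonneg hi]

lemma pvSetA_table (W H : Int) (F : Int → Int → Int) (i j v : Int)
    (hi : 0 ≤ i) (hiH : i ≤ H) (hj : 0 ≤ j) :
    pvSetA (pvTable W H F) i j v = pvTable W H (pvUpd F i j v) := by
  unfold pvSetA
  rw [pvTable_get W H F i hi hiH, PySem.List.pySetD_of_nonneg _ _ hj,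
    PySem.List.pySetD_of_nonneg _ _ hi]
  unfold pvTable pvUpd
  apply List.ext_getElem
  · simp
  · intro r h1 h2
    simp only [List.getElem_set, List.getElem_map, List.getElem_range]
    by_cases hri : i.toNat = r
    · rw [if_pos hri]
      apply List.ext_getElem
      · simp
      · intro c hc1 hc2
        simp only [List.getElem_set, List.getElem_map, List.getElem_range]
        by_cases hcj : j.toNat = c
        · rw [if_pos hcj, if_pos ⟨by omega, by omega⟩]
        · rw [if_neg hcj, if_neg (fun hh => hcj (by omega))]
          have hir : ((r : Int)) = i := by omega
          rw [hir]
    · rw [if_neg hri]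
      exact (List.map_congr_left (fun c _ => by
        rw [if_neg (fun hh => hri (by omega))])).symm

lemma pvMarkA_table (W H : Int) (F : Int → Int → Int) (i j v : Int)
    (hi : 0 ≤ i) (hiH : i < H) (hj : 0 ≤ j) :
    pvMarkA (pvTable W H F) i j v = pvTable W H (pvW4 F i j v) := by
  unfold pvMarkA pvW4
  rw [pvSetA_table W H F i j v hi (by omega) hj,
    pvSetA_table W H _ (i+1) j v (by omega) (by omega) hj,
    pvSetA_table W H _ i (j+1) v hi (by omega) (by omega),
    pvSetA_table W H _ (i+1) (j+1) v (by omega) (by omega) (by omega)]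

lemma pvInner_table (g : List (List Int)) (W H i : Int) (hi : 0 ≤ i) (hiH : i < H) :
    ∀ (J : List Int) (F : Int → Int → Int), (∀ j ∈ J, 0 ≤ j ∧ j < W) →
      J.foldl (fun gr j =>
          if pvReadA g i j = 2 then pvMarkA gr i j 2
          else if pvReadA g i j = 1 then pvMarkA gr i j 1
          else gr) (pvTable W H F)
        = pvTable W H (J.foldl (fun F j => pvStep g F i j) F) := by
  intro J
  induction J with
  | nil => intro F _; rfl
  | cons j J ih =>
      intro F hJ
      obtain ⟨hj, _⟩ := hJ j List.mem_cons_self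
      rw [List.foldl_cons, List.foldl_cons]
      have hstep :
          (if pvReadA g i j = 2 then pvMarkA (pvTable W H F) i j 2
           else if pvReadA g i j = 1 then pvMarkA (pvTable W H F) i j 1
           else pvTable W H F) = pvTable W H (pvStep g F i j) := by
        unfold pvStep
        split_ifs
        · exact pvMarkA_table W H F i j 2 hi hiH hj
        · exact pvMarkA_table W H F i j 1 hi hiH hj
        · rfl
      rw [hstep]
      exact ih _ (fun y hy => hJ y (List.mem_cons_of_mem _ hy))

lemma pvOuter_table (g : List (List Int)) (W H : Int) :
    ∀ (I : List Int) (F : Int → Int → Int), (∀ i ∈ I, 0 ≤ i ∧ i < H) →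
      I.foldl (fun gr i =>
          (PySem.List.pyRange 0 W 1).foldl (fun gr j =>
            if pvReadA g i j = 2 then pvMarkA gr i j 2
            else if pvReadA g i j = 1 then pvMarkA gr i j 1
            else gr) gr) (pvTable W H F)
        = pvTable W H (I.foldl (fun F i =>
            (PySem.List.pyRange 0 W 1).foldl (fun F j => pvStep g F i j) F) F) := by
  intro I
  induction I with
  | nil => intro F _; rfl
  | cons i I ih =>
      intro F hI
      obtain ⟨hi, hiH⟩ := hI i List.mem_cons_self
      rw [List.foldl_cons, List.foldl_cons,
        pvInner_table g W H i hi hiH (PySem.List.pyRange 0 W 1) F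
          (fun j hj => by rw [PySem.List.mem_pyRange_one] at hj; exact hj)]
      exact ih _ (fun y hy => hI y (List.mem_cons_of_mem _ hy))

-- the two ports agree on every input
lemma pvMain (data : List (String × List (String × List (List Int)))) (size : Int × Int) :
    load_collision_data data size = load_collision_data_alt data size := by
  unfold load_collision_data load_collision_data_alt
  have hbase : List.replicate (size.2 + 1).toNat (List.replicate (size.1 + 1).toNat (0 : Int))
      = pvTable size.1 size.2 (fun _ _ => 0) := by
    unfold pvTable
    simp [List.map_const']
  rw [hbase,
    pvOuter_table _ size.1 size.2 (PySem.List.pyRange 0 size.2 1) _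
      (fun i hi => by rw [PySem.List.mem_pyRange_one] at hi; exact hi),
    pvA_fun,
    PySem.List.pyRange_zero (size.2 + 1), PySem.List.pyRange_zero (size.1 + 1)]
  unfold pvTable
  simp [List.map_map, Function.comp_def]

-- ===== VERDICT (by name: the statement is the Claim_ definition above) =====
theorem load_collision_data_spec : Claim_equal_load_collision_data := by
  intro data size _ _
  unfold Spec_load_collision_data
  exact pvMain data size
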